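-- pv_equiv track=rewrite | github.com/Krzyzak321/Transmisja_ARQ | pico.py | calculate_crc4
-- ===== SOURCE A (Python) =====
-- CRC_PARITY_LEN = 4
--
-- def calculate_crc4(data_bits):
--     poly = 0x13
--     data_len = len(data_bits)
--     value = 0
--     for b in data_bits:
--         value = (value << 1) | (1 if b == '1' else 0)
--     value <<= CRC_PARITY_LEN
--     total_len = data_len + CRC_PARITY_LEN
--     for i in range(total_len - 1, CRC_PARITY_LEN - 1, -1):
--         if (value >> i) & 1:
--             value ^= (poly << (i - CRC_PARITY_LEN))
--     rem = value & ((1 << CRC_PARITY_LEN) - 1)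
--     return "{:04b}".format(rem)
-- ===== SOURCE B (Python) =====
-- CRC_PARITY_LEN = 4
--
-- def calculate_crc4(data_bits):
--     # Streaming CRC-4 register (poly x^4+x+1): one small register, one pass.
--     reg = 0
--     for c in data_bits:
--         reg = (reg << 1) | (1 if c == '1' else 0)
--         if reg & 0x10:
--             reg ^= 0x13
--     for _ in range(CRC_PARITY_LEN):
--         reg = reg << 1
--         if reg & 0x10:
--             reg ^= 0x13
--     return "{:04b}".format(reg & 0xF)
-- ===== Notes on version B (the rewrite author's own statement) =====
-- stated objective: alternative
-- what changed: Replaces A's pack-the-whole-message-into-one-big-integer pass followed by a top-down polynomial-division sweep with a streaming 5-bit CRC register updated once per input bit (plus 4 zero-padding steps), so no n-bit integer is ever built.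
import Mathlib
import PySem

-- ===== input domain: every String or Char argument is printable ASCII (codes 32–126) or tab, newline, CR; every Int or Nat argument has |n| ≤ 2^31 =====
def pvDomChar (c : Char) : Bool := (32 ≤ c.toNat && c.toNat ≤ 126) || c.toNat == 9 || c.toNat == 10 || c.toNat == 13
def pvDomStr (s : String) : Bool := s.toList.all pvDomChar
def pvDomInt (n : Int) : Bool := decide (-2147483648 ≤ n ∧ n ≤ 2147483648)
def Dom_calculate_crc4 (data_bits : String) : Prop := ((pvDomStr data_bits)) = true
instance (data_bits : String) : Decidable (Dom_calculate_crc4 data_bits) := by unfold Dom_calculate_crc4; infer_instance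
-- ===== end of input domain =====

-- B replaces A's big-integer pack + top-down division sweep by a streaming 5-bit CRC register (alternative algorithm, same cost).
-- All intermediate Python ints here are nonnegative, so Nat is exact for them.

-- "{:04b}".format(n) for n ≥ 0: binary digits left-padded with '0' to width 4 (shared formatting helper of both pythons)
def fmt04b (n : Nat) : String := PySem.Str.zfill (PySem.Int.toBin (n : Int)) 4

-- ===== PORT A =====
def calculate_crc4 (data_bits : String) : String :=
  let poly : Nat := 0x13
  let data_len : Nat := data_bits.toList.length
  let value : Nat := data_bits.toList.foldl (fun v b => (v <<< 1) ||| (if b = '1' then 1 else 0)) 0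
  let value := value <<< 4
  let total_len := data_len + 4
  let value := (PySem.List.pyRange ((total_len : Int) - 1) (4 - 1) (-1)).foldl
      (fun v i => if (v >>> i.toNat) &&& 1 = 1 then v ^^^ (poly <<< (i.toNat - 4)) else v) value
  let rem := value &&& ((1 <<< 4) - 1)
  fmt04b rem

-- ===== PORT B =====
def crcStep (r : Nat) (c : Char) : Nat :=
  let r2 := (r <<< 1) ||| (if c = '1' then 1 else 0)
  if r2 &&& 0x10 ≠ 0 then r2 ^^^ 0x13 else r2

def calculate_crc4_alt (data_bits : String) : String :=
  let reg := data_bits.toList.foldl crcStep 0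
  let reg := (List.range 4).foldl (fun r _ =>
      let r2 := r <<< 1
      if r2 &&& 0x10 ≠ 0 then r2 ^^^ 0x13 else r2) reg
  fmt04b (reg &&& 0xF)

-- ===== PRECONDITION & SPEC =====
def Spec_calculate_crc4 (data_bits : String) (out : String) : Prop := out = calculate_crc4_alt data_bits
instance (data_bits : String) (out : String) : Decidable (Spec_calculate_crc4 data_bits out) := by unfold Spec_calculate_crc4; infer_instance

-- ===== CLAIM (what is proved, stated in full; the proofs are below) =====
def Claim_equal_calculate_crc4 : Prop := ∀ (data_bits : String), Dom_calculate_crc4 data_bits → Spec_calculate_crc4 data_bits (calculate_crc4 data_bits)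

-- ===== LEMMAS AND PROOFS =====

-- bit value of a char, and the front-to-back packed value of a char list
def bitc (c : Char) : Nat := if c = '1' then 1 else 0
def numC (M : List Char) : Nat := M.foldl (fun v c => 2 * v + bitc c) 0

-- A's division loop as structural recursion on the number of remaining indices
def divSteps : Nat → Nat → Nat
  | v, 0 => v
  | v, m + 1 => divSteps (if (v >>> (m + 4)) &&& 1 = 1 then v ^^^ (19 <<< m) else v) m

theorem bitc_le (c : Char) : bitc c ≤ 1 := by unfold bitc; split <;> omega

theorem two_mul_or (v b : Nat) (hb : b ≤ 1) : 2 * v ||| b = 2 * v + b := by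
  interval_cases b
  · simp
  · have h : 2 * v = Nat.bit false v := by simp [Nat.bit]
    rw [h, show (1 : Nat) = Nat.bit true 0 by rfl, Nat.lor_bit]
    simp [Nat.bit]

theorem xor_double (x y u w : Nat) (hu : u ≤ 1) (hw : w ≤ 1) :
    (2 * x + u) ^^^ (2 * y + w) = 2 * (x ^^^ y) + (u ^^^ w) := by
  have hf : ∀ z : Nat, 2 * z = Nat.bit false z := by intro z; simp [Nat.bit]
  have ht : ∀ z : Nat, 2 * z + 1 = Nat.bit true z := by intro z; simp [Nat.bit]
  interval_cases u <;> interval_cases w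
  · simp only [Nat.add_zero]; rw [hf x, hf y, Nat.xor_bit]; simp [Nat.bit]
  · simp only [Nat.add_zero]; rw [ht y, hf x, Nat.xor_bit]; simp [Nat.bit]
  · simp only [Nat.add_zero]; rw [ht x, hf y, Nat.xor_bit]; simp [Nat.bit]
  · rw [ht x, ht y, Nat.xor_bit]; simp [Nat.bit]

theorem xor_disjoint (m : Nat) : ∀ a b low : Nat, low < 2 ^ m →
    (a * 2 ^ m + low) ^^^ (b * 2 ^ m) = (a ^^^ b) * 2 ^ m + low := by
  induction m with
  | zero => intro a b low h; interval_cases low; simp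
  | succ m ih =>
    intro a b low h
    have e1 : a * 2 ^ (m + 1) = 2 * (a * 2 ^ m) := by rw [pow_succ]; ring
    have e2 : b * 2 ^ (m + 1) = 2 * (b * 2 ^ m) := by rw [pow_succ]; ring
    have e3 : (a ^^^ b) * 2 ^ (m + 1) = 2 * ((a ^^^ b) * 2 ^ m) := by rw [pow_succ]; ring
    have hh : low < 2 ^ m * 2 := by rw [pow_succ] at h; omega
    have h1 : a * 2 ^ (m + 1) + low = 2 * (a * 2 ^ m + low / 2) + low % 2 := by omega
    have h2 : b * 2 ^ (m + 1) = 2 * (b * 2 ^ m) + 0 := by omega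
    rw [h1, h2, xor_double _ _ _ _ (by omega) (by omega),
      ih a b (low / 2) (by omega), Nat.xor_zero, e3]
    omega

theorem foldl_pack (M : List Char) : ∀ v : Nat,
    M.foldl (fun v c => 2 * v + bitc c) v = v * 2 ^ M.length + numC M := by
  induction M with
  | nil => intro v; simp [numC]
  | cons c M ih =>
    intro v
    simp only [List.foldl_cons, List.length_cons, numC]
    rw [ih (2 * v + bitc c), ih (2 * 0 + bitc c)]
    rw [pow_succ]; ring

theorem numC_cons (c : Char) (M : List Char) :
    numC (c :: M) = bitc c * 2 ^ M.length + numC M := by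
  conv_lhs => rw [show numC (c :: M) = M.foldl (fun v c => 2 * v + bitc c) (2 * 0 + bitc c) from rfl]
  rw [foldl_pack]
  ring

theorem numC_lt (M : List Char) : numC M < 2 ^ M.length := by
  induction M with
  | nil => simp [numC]
  | cons c M ih =>
    rw [numC_cons, List.length_cons, pow_succ]
    have := bitc_le c
    nlinarith

theorem numC_append (X Y : List Char) :
    numC (X ++ Y) = numC X * 2 ^ Y.length + numC Y := by
  simp only [numC, List.foldl_append]
  exact foldl_pack Y _

theorem and16_eq (x : Nat) (h : x < 32) : x &&& 16 = if 16 ≤ x then 16 else 0 := by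
  interval_cases x <;> decide

theorem crcStep_eq (r : Nat) (c : Char) (hr : r < 16) :
    crcStep r c = if 16 ≤ 2 * r + bitc c then (2 * r + bitc c) ^^^ 19 else 2 * r + bitc c := by
  have hb := bitc_le c
  have h2 : (r <<< 1) ||| (if c = '1' then 1 else 0) = 2 * r + bitc c := by
    rw [Nat.shiftLeft_eq, pow_one, Nat.mul_comm]
    exact two_mul_or r (bitc c) hb
  show (if ((r <<< 1) ||| (if c = '1' then 1 else 0)) &&& 16 ≠ 0
      then ((r <<< 1) ||| (if c = '1' then 1 else 0)) ^^^ 19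
      else ((r <<< 1) ||| (if c = '1' then 1 else 0))) = _
  rw [h2, and16_eq _ (by omega)]
  by_cases hc : 16 ≤ 2 * r + bitc c
  · simp [hc]
  · simp [hc]

theorem xor19_lt (R : Nat) (h1 : 16 ≤ R) (h2 : R < 32) : R ^^^ 19 < 16 := by
  interval_cases R <;> decide

-- the main invariant: A's division over the remaining indices equals B's streaming fold
theorem main_inv (M : List Char) : ∀ r : Nat, r < 16 →
    divSteps (r * 2 ^ M.length + numC M) M.length = M.foldl crcStep r := by
  induction M with
  | nil => intro r _; simp [divSteps, numC]
  | cons c M ih =>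
    intro r hr
    simp only [List.length_cons, List.foldl_cons, numC_cons, divSteps]
    have hble := bitc_le c
    have hlow := numC_lt M
    set m := M.length with hm
    set b := bitc c with hb
    set low := numC M with hlow'
    have hv : r * 2 ^ (m + 1) + (b * 2 ^ m + low) = (2 * r + b) * 2 ^ m + low := by
      rw [pow_succ]; ring
    set R := 2 * r + b with hR
    have hR32 : R < 32 := by omega
    have hdiv : ((R * 2 ^ m + low) >>> (m + 4)) &&& 1 = R / 16 % 2 := by
      rw [Nat.shiftRight_eq_div_pow, Nat.and_one_is_mod]
      have e1 : 2 ^ (m + 4) = 2 ^ m * 16 := by rw [pow_add]; norm_num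
      rw [e1, ← Nat.div_div_eq_div_mul]
      have e2 : (R * 2 ^ m + low) / 2 ^ m = R := by
        rw [Nat.mul_comm R, Nat.mul_add_div (pow_pos (by norm_num : (0:ℕ) < 2) m),
          Nat.div_eq_of_lt hlow]
        omega
      rw [e2]
    rw [hv, crcStep_eq r c hr, ← hb, ← hR]
    by_cases hc : 16 ≤ R
    · have hcond : ((R * 2 ^ m + low) >>> (m + 4)) &&& 1 = 1 := by rw [hdiv]; omega
      rw [if_pos hcond, if_pos hc]
      have h19 : (19 : Nat) <<< m = 19 * 2 ^ m := by rw [Nat.shiftLeft_eq]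
      rw [h19, xor_disjoint m R 19 low hlow]
      exact ih (R ^^^ 19) (xor19_lt R hc hR32)
    · have hcond : ¬ (((R * 2 ^ m + low) >>> (m + 4)) &&& 1 = 1) := by rw [hdiv]; omega
      rw [if_neg hcond, if_neg hc]
      exact ih R (by omega)

-- streaming never reduces while the register still fits: the first |Q| ≤ 4 bits are just packed
theorem stream_pack (Q : List Char) : ∀ r : Nat, (r + 1) * 2 ^ Q.length ≤ 16 →
    Q.foldl crcStep r = r * 2 ^ Q.length + numC Q := by
  induction Q with
  | nil => intro r _; simp [numC]
  | cons c Q ih =>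
    intro r h
    have hb := bitc_le c
    have hp : 0 < 2 ^ Q.length := pow_pos (by norm_num) _
    have hlen : (r + 1) * 2 ^ (c :: Q).length = (2 * (r + 1)) * 2 ^ Q.length := by
      simp only [List.length_cons, pow_succ]; ring
    rw [hlen] at h
    have hr : r < 16 := by nlinarith
    have hR : ¬ (16 ≤ 2 * r + bitc c) := by nlinarith
    simp only [List.foldl_cons]
    rw [crcStep_eq r c hr, if_neg hR, ih (2 * r + bitc c) (by nlinarith), numC_cons,
      List.length_cons, pow_succ]
    ring

-- A's pyRange fold is divSteps
theorem range_fold (n : Nat) : ∀ v : Nat,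
    ((PySem.List.pyRange ((n : Int) + 4 - 1) (4 - 1) (-1)).foldl
      (fun v i => if (v >>> i.toNat) &&& 1 = 1 then v ^^^ ((0x13 : Nat) <<< (i.toNat - 4)) else v) v)
    = divSteps v n := by
  induction n with
  | zero =>
    intro v
    rw [PySem.List.pyRange_neg_one_eq_nil (by norm_num : ((0:Nat):Int) + 4 - 1 ≤ 4 - 1)]
    simp [divSteps]
  | succ n ih =>
    intro v
    rw [PySem.List.pyRange_neg_one_cons (by push_cast; omega : (4:Int) - 1 < ((n+1 : Nat):Int) + 4 - 1)]
    simp only [List.foldl_cons]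
    have e2 : (((n+1 : Nat):Int) + 4 - 1 - 1) = ((n : Nat):Int) + 4 - 1 := by push_cast; ring
    rw [e2, ih]
    have e1 : (((n+1 : Nat):Int) + 4 - 1).toNat = n + 4 := by omega
    simp only [divSteps, e1, show n + 4 - 4 = n from by omega]

-- B's four padding steps are crcStep on '0'
theorem pad_steps (r : Nat) :
    (List.range 4).foldl (fun r _ =>
      if r <<< 1 &&& 16 ≠ 0 then r <<< 1 ^^^ 19 else r <<< 1) r
    = List.foldl crcStep r ['0', '0', '0', '0'] := by
  have step : ∀ x : Nat,
      (if x <<< 1 &&& 16 ≠ 0 then x <<< 1 ^^^ 19 else x <<< 1) = crcStep x '0' := by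
    intro x
    simp [crcStep]
  simp only [show List.range 4 = [0, 1, 2, 3] from by decide, List.foldl_cons, List.foldl_nil, step]

-- the packing fold of A equals the packing fold written with bitc
theorem pack_fold (L : List Char) : ∀ v : Nat,
    L.foldl (fun v b => (v <<< 1) ||| (if b = '1' then 1 else 0)) v
    = L.foldl (fun v c => 2 * v + bitc c) v := by
  induction L with
  | nil => intro v; rfl
  | cons c L ih =>
    intro v
    simp only [List.foldl_cons]
    rw [show (v <<< 1) ||| (if c = '1' then 1 else 0) = 2 * v + bitc c by
      rw [Nat.shiftLeft_eq, pow_one, Nat.mul_comm]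
      exact two_mul_or v (bitc c) (bitc_le c)]
    exact ih _

theorem core_eq (L : List Char) :
    divSteps (numC L <<< 4) L.length = (L ++ ['0', '0', '0', '0']).foldl crcStep 0 := by
  set P := L ++ ['0', '0', '0', '0'] with hP
  have hPlen : P.length = L.length + 4 := by simp [hP]
  have htd : P.take 4 ++ P.drop 4 = P := List.take_append_drop 4 P
  have hlt : (P.take 4).length ≤ 4 := by simp
  have hdl : (P.drop 4).length = L.length := by simp [hPlen]
  have hr : numC (P.take 4) < 16 := by
    have h1 := numC_lt (P.take 4)
    have h2 : (2 : Nat) ^ (P.take 4).length ≤ 2 ^ 4 := Nat.pow_le_pow_right (by norm_num) hlt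
    omega
  have hv : numC L <<< 4 = numC (P.take 4) * 2 ^ (P.drop 4).length + numC (P.drop 4) := by
    rw [← numC_append, htd, hP, numC_append, Nat.shiftLeft_eq]
    simp [numC, bitc]
  have hsplit : P.foldl crcStep 0 = (P.drop 4).foldl crcStep (numC (P.take 4)) := by
    conv_lhs => rw [← htd]
    rw [List.foldl_append, stream_pack (P.take 4) 0
      (by simpa using Nat.pow_le_pow_right (show 1 ≤ 2 by norm_num) hlt)]
    simp
  rw [hsplit, ← hdl, hv, main_inv (P.drop 4) (numC (P.take 4)) hr]

-- ===== VERDICT (by name: the statement is the Claim_ definition above) =====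
theorem calculate_crc4_spec : Claim_equal_calculate_crc4 := by
  intro s _
  show calculate_crc4 s = calculate_crc4_alt s
  simp only [calculate_crc4, calculate_crc4_alt]
  rw [pack_fold, show List.foldl (fun v c => 2 * v + bitc c) 0 s.toList = numC s.toList from rfl]
  rw [show ((s.toList.length + 4 : Nat) : Int) - 1 = ((s.toList.length : Nat) : Int) + 4 - 1 from by push_cast; ring]
  rw [range_fold s.toList.length (numC s.toList <<< 4), core_eq, pad_steps,
    ← List.foldl_append, show (1 : Nat) <<< 4 - 1 = 0xF from by decide]
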